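-- pv_equiv track=rewrite | github.com/hanbeulYou/Algorithm_Solve | CodingTest/2022_tossNEXT/7.py | solution
-- ===== SOURCE A (Python) =====
-- def invite(pairs, ifrom, d):
--     if d == 2 :
--         p = 0
--         for i in pairs :
--             if i[0] == ifrom :
--                 p+=1
--         return p
--
--     if d == 1 :
--         p1 = 0
--         p2 = 0
--         for i in pairs :
--             if i[0] == ifrom :
--                 p1 += 3
--                 p2 += invite(pairs, i[1], 2)
--         return p1 + p2
--
--     if d == 0 :
--         p1 = 0
--         p2 = 0
--         for i in pairs :
--             if i[0] == ifrom :
--                 p1 += 5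
--                 p2 += invite(pairs, i[1], 1)
--         return p1 + p2
--
-- def solution(invitationPairs):
--     i_dict = {}
--     for i in invitationPairs :
--         i_dict[i[0]] = invite(invitationPairs, i[0], 0)
--     sorted_i = sorted(i_dict.items(), key=lambda x: x[1], reverse=True)
--     n = len(sorted_i)
--     answer = []
--     if n > 3 :
--         for i in range(3) :
--             answer.append(sorted_i[i][0])
--     else :
--         for i in range(n) :
--             answer.append(sorted_i[i][0])
--
--     return answer
-- ===== SOURCE B (Python) =====
-- def solution(invitationPairs):
--     edges = [(p[0], p[1]) for p in invitationPairs]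
--     children = {}
--     for a, b in edges:
--         children[a] = children.get(a, []) + [b]
--     scores = []
--     for node in children:
--         s = 0
--         for c in children[node]:
--             s += 5
--             for g in children.get(c, []):
--                 s += 3 + len(children.get(g, []))
--         scores.append((node, s))
--     scores = sorted(scores, key=lambda x: x[1], reverse=True)
--     return [node for node, _ in scores[:3]]
-- ===== Notes on version B (the rewrite author's own statement) =====
-- stated objective: faster
-- what changed: B builds an adjacency dict node->invitees once and sums the 5/3/1 weights by walking children/grandchildren/great-grandchildren lists directly, instead of A's recursive invite() that rescans the whole pair list at each of the three levels for every node.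
import Mathlib
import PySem

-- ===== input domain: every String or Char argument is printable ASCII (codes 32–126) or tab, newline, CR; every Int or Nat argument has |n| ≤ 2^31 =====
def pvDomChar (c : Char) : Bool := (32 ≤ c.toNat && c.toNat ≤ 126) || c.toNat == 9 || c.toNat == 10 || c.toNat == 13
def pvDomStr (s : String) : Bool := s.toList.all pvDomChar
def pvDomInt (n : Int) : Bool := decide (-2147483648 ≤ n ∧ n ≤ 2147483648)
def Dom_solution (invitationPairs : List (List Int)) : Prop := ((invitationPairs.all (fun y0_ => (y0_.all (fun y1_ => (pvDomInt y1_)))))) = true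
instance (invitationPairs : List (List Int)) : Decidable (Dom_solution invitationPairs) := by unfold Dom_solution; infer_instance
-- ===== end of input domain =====

-- B replaces A's O(n) rescans at every tree level (O(n^4) total) by one adjacency dict
-- node -> invitees built once, then sums 5/3/1 weights over children/grandchildren/
-- great-grandchildren directly (objective: faster).

-- ===== PORT A =====
-- Python's 'invite(pairs, ifrom, d)' is only ever called with d = 2, 1, 0; its three
-- 'if d == …' branches are transliterated as the three helpers invite2/invite1/invite0.
def invite2 (pairs : List (List Int)) (ifrom : Int) : Int :=
  pairs.foldl (fun p i => if (PySem.List.pyGet? i 0).getD 0 == ifrom then p + 1 else p) 0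

def invite1 (pairs : List (List Int)) (ifrom : Int) : Int :=
  let pq := pairs.foldl (fun pq i =>
    if (PySem.List.pyGet? i 0).getD 0 == ifrom then
      (pq.1 + 3, pq.2 + invite2 pairs ((PySem.List.pyGet? i 1).getD 0))
    else pq) ((0 : Int), (0 : Int))
  pq.1 + pq.2

def invite0 (pairs : List (List Int)) (ifrom : Int) : Int :=
  let pq := pairs.foldl (fun pq i =>
    if (PySem.List.pyGet? i 0).getD 0 == ifrom then
      (pq.1 + 5, pq.2 + invite1 pairs ((PySem.List.pyGet? i 1).getD 0))
    else pq) ((0 : Int), (0 : Int))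
  pq.1 + pq.2

def solution (invitationPairs : List (List Int)) : List Int :=
  let iDict : PySem.Dict Int Int := invitationPairs.foldl
    (fun d i => d.insert ((PySem.List.pyGet? i 0).getD 0)
      (invite0 invitationPairs ((PySem.List.pyGet? i 0).getD 0))) PySem.Dict.empty
  let sortedI := PySem.List.sorted iDict.items (fun x => x.2) true
  let n : Int := (sortedI.length : Int)
  if n > 3 then
    (PySem.List.pyRange 0 3 1).foldl
      (fun ans i => ans ++ [((PySem.List.pyGet? sortedI i).getD (0, 0)).1]) []
  else
    (PySem.List.pyRange 0 n 1).foldl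
      (fun ans i => ans ++ [((PySem.List.pyGet? sortedI i).getD (0, 0)).1]) []

-- ===== PORT B =====
def solution_alt (invitationPairs : List (List Int)) : List Int :=
  let edges := invitationPairs.map
    (fun p => ((PySem.List.pyGet? p 0).getD 0, (PySem.List.pyGet? p 1).getD 0))
  let children : PySem.Dict Int (List Int) :=
    edges.foldl (fun d p => d.modify p.1 [] (· ++ [p.2])) PySem.Dict.empty
  let scores := children.keys.foldl (fun acc node =>
    acc ++ [(node, (children.getD node []).foldl (fun s c =>
      (children.getD c []).foldl
        (fun s g => s + 3 + ((children.getD g []).length : Int)) (s + 5)) 0)]) []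
  let sortedScores := PySem.List.sorted scores (fun x => x.2) true
  (PySem.List.slice sortedScores none (some 3)).map (fun x => x.1)

-- ===== PRECONDITION & SPEC =====
-- Pre_: A raises IndexError (i[0] or i[1]) as soon as some row has fewer than 2 entries;
-- exactly those inputs are excluded.
def Pre_solution (invitationPairs : List (List Int)) : Prop :=
  ∀ row ∈ invitationPairs, 2 ≤ row.length
instance (invitationPairs : List (List Int)) : Decidable (Pre_solution invitationPairs) := by
  unfold Pre_solution; infer_instance
def pvWitness_solution : List (List Int) := [[1, 2], [1, 3], [2, 4], [4, 5]]
def Spec_solution (invitationPairs : List (List Int)) (out : List Int) : Prop := out = solution_alt invitationPairs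
instance (invitationPairs : List (List Int)) (out : List Int) : Decidable (Spec_solution invitationPairs out) := by unfold Spec_solution; infer_instance

-- ===== CLAIM (what is proved, stated in full; the proofs are below) =====
def Claim_equal_solution : Prop := ∀ (invitationPairs : List (List Int)), Dom_solution invitationPairs → Pre_solution invitationPairs → Spec_solution invitationPairs (solution invitationPairs)

-- ===== LEMMAS AND PROOFS =====
-- proof-side abbreviations
def pvHd (i : List Int) : Int := (PySem.List.pyGet? i 0).getD 0
def pvSn (i : List Int) : Int := (PySem.List.pyGet? i 1).getD 0
def pvE (pairs : List (List Int)) (k : Int) : List Int :=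
  (pairs.filter (fun i => pvHd i == k)).map pvSn
-- canonical score: 5 per child, 3 per grandchild, 1 per great-grandchild
def pvScore (pairs : List (List Int)) (k : Int) : Int :=
  ((pvE pairs k).map (fun c =>
    5 + ((pvE pairs c).map (fun g => (3 : Int) + ((pvE pairs g).length : Int))).sum)).sum

-- a two-accumulator filtered loop is (constant * count, sum over the filtered list)
theorem pv_pairLoop (l : List (List Int)) (p : List Int → Bool) (c : Int)
    (f : List Int → Int) (a b : Int) :
    l.foldl (fun pq i => if p i then (pq.1 + c, pq.2 + f i) else pq) (a, b)
      = (a + c * (l.countP p : Int), b + ((l.filter p).map f).sum) := by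
  induction l generalizing a b with
  | nil => simp
  | cons x t ih =>
    by_cases hx : p x = true
    · simp [hx, ih]; constructor <;> ring
    · simp [hx, ih]

theorem pv_invite2_eq (pairs : List (List Int)) (g : Int) :
    invite2 pairs g = ((pvE pairs g).length : Int) := by
  unfold invite2 pvE
  rw [PySem.List.foldl_if_add_one (fun i => (PySem.List.pyGet? i 0).getD 0 == g)]
  simp [pvHd, List.countP_eq_length_filter]

theorem pv_invite1_eq (pairs : List (List Int)) (c : Int) :
    invite1 pairs c
      = ((pvE pairs c).map (fun g => (3 : Int) + ((pvE pairs g).length : Int))).sum := by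
  unfold invite1
  rw [pv_pairLoop pairs (fun i => (PySem.List.pyGet? i 0).getD 0 == c) 3
      (fun i => invite2 pairs ((PySem.List.pyGet? i 1).getD 0)) 0 0]
  simp only [pvE, List.map_map, Function.comp_def, pv_invite2_eq]
  rw [List.sum_map_add]
  simp [pvHd, pvSn, List.countP_eq_length_filter, mul_comm]

theorem pv_invite0_eq (pairs : List (List Int)) (k : Int) :
    invite0 pairs k = pvScore pairs k := by
  unfold invite0 pvScore
  rw [pv_pairLoop pairs (fun i => (PySem.List.pyGet? i 0).getD 0 == k) 5
      (fun i => invite1 pairs ((PySem.List.pyGet? i 1).getD 0)) 0 0]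
  simp only [pvE, List.map_map, Function.comp_def, pv_invite1_eq]
  rw [List.sum_map_add]
  simp [pvHd, pvSn, List.countP_eq_length_filter, mul_comm]

-- a keyed insert loop whose value depends only on the key
theorem pv_getD_insert_loop (l : List (List Int)) (v : Int → Int) (d : PySem.Dict Int Int)
    (k : Int) (d0 : Int) :
    (l.foldl (fun d i => d.insert (pvHd i) (v (pvHd i))) d).getD k d0
      = if k ∈ l.map pvHd then v k else d.getD k d0 := by
  induction l generalizing d with
  | nil => simp
  | cons x t ih =>
    simp only [List.foldl_cons, ih, List.map_cons, List.mem_cons]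
    by_cases hk : k ∈ t.map pvHd
    · simp [hk]
    · by_cases he : k = pvHd x
      · simp [hk, he, PySem.Dict.getD_insert]
      · simp [hk, he, PySem.Dict.getD_insert]

-- the indexing loop over range(k) is take k
theorem pv_takeLoop (l : List (Int × Int)) (k : Nat) (hk : k ≤ l.length) :
    (PySem.List.pyRange 0 (k : Int) 1).foldl
      (fun ans i => ans ++ [((PySem.List.pyGet? l i).getD (0, 0)).1]) ([] : List Int)
      = (l.take k).map (fun x => x.1) := by
  induction k with
  | zero => simp [PySem.List.pyRange]
  | succ m ih =>
    have h0 : (0 : Int) ≤ (m : Int) := by positivity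
    rw [show (((m + 1 : Nat)) : Int) = (m : Int) + 1 by push_cast; ring,
        PySem.List.pyRange_one_succ_right h0, List.foldl_append]
    have hm : m < l.length := by omega
    rw [ih (by omega)]
    rw [List.foldl_cons, List.foldl_nil, PySem.List.pyGet?_natCast,
        List.getElem?_eq_getElem hm, List.take_add_one, List.getElem?_eq_getElem hm]
    simp
    rw [List.take_add_one (l := List.map (fun x => x.1) l) (i := m)]
    simp [List.getElem?_map, List.getElem?_eq_getElem hm]

-- B's nested per-node fold computes the canonical score
theorem pv_scoreB (pairs : List (List Int)) (k : Int) :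
    (pvE pairs k).foldl (fun s c =>
      (pvE pairs c).foldl (fun s g => s + 3 + ((pvE pairs g).length : Int)) (s + 5)) 0
      = pvScore pairs k := by
  have hinner : ∀ (c s : Int),
      (pvE pairs c).foldl (fun s g => s + 3 + ((pvE pairs g).length : Int)) s
        = s + ((pvE pairs c).map (fun g => (3 : Int) + ((pvE pairs g).length : Int))).sum := by
    intro c s
    rw [← PySem.List.foldl_add (pvE pairs c)
        (fun g => (3 : Int) + ((pvE pairs g).length : Int)) s]
    exact PySem.List.foldl_congr_mem _ _ _ _ (fun acc x _ => by ring)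
  simp only [hinner]
  rw [PySem.List.foldl_congr_mem _ _
      (fun s c => s + (5 + ((pvE pairs c).map (fun g => (3 : Int) + ((pvE pairs g).length : Int))).sum))
      _ (fun acc x _ => by ring)]
  rw [PySem.List.foldl_add (pvE pairs k)
      (fun c => 5 + ((pvE pairs c).map (fun g => (3 : Int) + ((pvE pairs g).length : Int))).sum) 0]
  simp [pvScore]

theorem pv_main (pairs : List (List Int)) : solution pairs = solution_alt pairs := by
  unfold solution solution_alt
  simp only [show ∀ i, (PySem.List.pyGet? i (0:Int)).getD 0 = pvHd i from fun _ => rfl,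
             show ∀ i, (PySem.List.pyGet? i (1:Int)).getD 0 = pvSn i from fun _ => rfl,
             pv_invite0_eq]
  have hA : (List.foldl (fun d i => d.insert (pvHd i) (pvScore pairs (pvHd i)))
      PySem.Dict.empty pairs).items
      = (PySem.Set.update [] (pairs.map pvHd)).map (fun k => (k, pvScore pairs k)) := by
    have hnod := PySem.Dict.nodup_keys_foldl_insert_key pairs pvHd
      (fun _ i => pvScore pairs (pvHd i)) PySem.Dict.empty (by simp)
    rw [PySem.Dict.items_eq_map_keys _ hnod 0,
        PySem.Dict.keys_foldl_insert_key pairs pvHd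
          (fun _ i => pvScore pairs (pvHd i)) PySem.Dict.empty]
    simp only [PySem.Dict.keys_empty]
    apply List.map_congr_left
    intro k hk
    have hkmem : k ∈ pairs.map pvHd := by
      simpa [PySem.Set.mem_ofList] using hk
    rw [pv_getD_insert_loop]
    simp [hkmem]
  rw [hA]
  have hch : ∀ c, (List.foldl (fun d p => d.modify p.1 [] (· ++ [p.2])) PySem.Dict.empty
      (List.map (fun p => (pvHd p, pvSn p)) pairs)).getD c [] = pvE pairs c := by
    intro c
    rw [PySem.Dict.getD_foldl_modify_append]
    simp [pvE, List.filter_map, Function.comp_def]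
  simp only [hch, pv_scoreB]
  rw [PySem.List.foldl_append_singleton_eq_map (fun node => (node, pvScore pairs node))]
  rw [PySem.Dict.keys_foldl_modify_key (List.map (fun p => (pvHd p, pvSn p)) pairs)
      (fun p => p.1) [] (fun _ p => (· ++ [p.2])) PySem.Dict.empty]
  simp only [PySem.Dict.keys_empty, List.map_map, Function.comp_def, List.nil_append]
  rw [show (List.map (fun x => pvHd x) pairs) = List.map pvHd pairs from rfl]
  set S := PySem.List.sorted
      (List.map (fun k => (k, pvScore pairs k)) (PySem.Set.update [] (List.map pvHd pairs)))
      (fun x => x.2) true with hSdef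
  rw [PySem.List.slice_to S (b := 3) (by norm_num)]
  by_cases h3 : 3 < S.length
  · rw [if_pos (by exact_mod_cast h3)]
    have h := pv_takeLoop S 3 (by omega)
    simp only [Nat.cast_ofNat] at h
    rw [h, show (Int.toNat 3) = 3 from rfl]
  · rw [if_neg (by push_cast; omega)]
    have h := pv_takeLoop S S.length le_rfl
    rw [h]
    rw [List.take_length, show ((3:Int)).toNat = 3 from rfl,
        List.take_of_length_le (by omega)]

-- ===== VERDICT (by name: the statement is the Claim_ definition above) =====
theorem solution_spec : Claim_equal_solution := by
  intro pairs _ _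
  unfold Spec_solution
  exact pv_main pairs
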